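-- pv_equiv track=rewrite | github.com/adarhp0/coding | 6apr/cafe_reder_cake.py | is_first_come_first_served
-- ===== SOURCE A (Python) =====
-- def is_first_come_first_served(take_out_orders, dine_in_orders, served_orders):
--
--     # Check if we're serving orders first-come, first-served
--     my_list=take_out_orders
--     alices_list=dine_in_orders
--     new_list=[]
--     n1=len(my_list)
--     n2=len(alices_list)
--     n3=len(served_orders)
--     i=0
--     j=0
--     k=0
--     fl=0
--     if n1+n2!=n3:
--         return False
--     while i<n1 and j<n2 and k<n3:
--         if my_list[i]<alices_list[j]:
--             if my_list[i]==served_orders[k]: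
--                 i=i+1
--                 k=k+1
--                 fl=0
--             else:
--                 return False
--         else:
--             if alices_list[j]==served_orders[k]:
--                 j=j+1
--                 k=k+1
--                 fl=0
--             else:
--                 return False
--     while i<n1 and k<n3:
--         if my_list[i]==served_orders[k]:
--             i=i+1
--             k=k+1
--             fl=0
--         else:
--             return False
--     while j<n2 and k<n3:
--         if alices_list[j]==served_orders[k]:
--             j=j+1
--             k=k+1
--             fl=0
--         else:
--             return False
--     return True
-- ===== SOURCE B (Python) =====
-- def is_first_come_first_served(take_out_orders, dine_in_orders, served_orders):
--     # Drive by served_orders: consume the two queues as reversed stacks,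
--     # with no upfront length check; leftovers are checked at the end.
--     ts = take_out_orders[::-1]
--     ds = dine_in_orders[::-1]
--     for order in served_orders:
--         if ts and ds:
--             src = ts if ts[-1] < ds[-1] else ds
--         elif ts:
--             src = ts
--         elif ds:
--             src = ds
--         else:
--             return False
--         if src.pop() != order:
--             return False
--     return not ts and not ds
-- ===== Notes on version B (the rewrite author's own statement) =====
-- stated objective: alternative
-- what changed: A's upfront length check plus three index-based while loops over the queues is replaced by a single for-loop driven by served_orders that consumes the two queues as reversed stacks (pop from the end), with leftover-emptiness checked at the end instead of a length precheck.
import Mathlib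
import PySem

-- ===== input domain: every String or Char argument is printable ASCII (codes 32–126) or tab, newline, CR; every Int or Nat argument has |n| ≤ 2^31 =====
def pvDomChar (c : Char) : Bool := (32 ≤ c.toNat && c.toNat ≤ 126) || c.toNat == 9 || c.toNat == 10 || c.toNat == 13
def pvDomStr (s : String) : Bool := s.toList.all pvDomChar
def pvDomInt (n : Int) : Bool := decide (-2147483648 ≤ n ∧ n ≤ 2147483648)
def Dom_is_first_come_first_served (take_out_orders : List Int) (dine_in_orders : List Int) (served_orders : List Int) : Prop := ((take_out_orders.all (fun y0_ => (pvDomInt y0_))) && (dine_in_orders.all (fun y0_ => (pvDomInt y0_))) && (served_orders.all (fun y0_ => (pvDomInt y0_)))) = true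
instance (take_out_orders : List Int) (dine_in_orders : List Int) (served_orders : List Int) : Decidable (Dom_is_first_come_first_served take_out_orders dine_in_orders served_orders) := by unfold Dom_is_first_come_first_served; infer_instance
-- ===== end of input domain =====

-- B drives a single loop by served_orders, consuming the two queues as reversed
-- stacks and checking leftovers at the end, instead of A's length precheck plus
-- three index-based while loops (objective: alternative decomposition).
-- ===== PORT A =====
-- A's third while loop: consume dine_in tail against served tail
def fcfsLoop3 : List Int → List Int → Bool
  | y :: ys, z :: zs => if y = z then fcfsLoop3 ys zs else false
  | _, _ => true

-- A's second while loop: consume take_out tail against served tail, then fall to loop3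
def fcfsLoop2 : List Int → List Int → List Int → Bool
  | x :: xs, ys, z :: zs => if x = z then fcfsLoop2 xs ys zs else false
  | _, ys, zs => fcfsLoop3 ys zs

-- A's first while loop: both queues nonempty; pick the smaller head and match it
def fcfsLoop1 : List Int → List Int → List Int → Bool
  | x :: xs, y :: ys, z :: zs =>
      if x < y then (if x = z then fcfsLoop1 xs (y :: ys) zs else false)
      else (if y = z then fcfsLoop1 (x :: xs) ys zs else false)
  | xs, ys, zs => fcfsLoop2 xs ys zs

def is_first_come_first_served (take_out_orders : List Int) (dine_in_orders : List Int) (served_orders : List Int) : Bool :=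
  if take_out_orders.length + dine_in_orders.length ≠ served_orders.length then false
  else fcfsLoop1 take_out_orders dine_in_orders served_orders

-- ===== PORT B =====
-- B's for-loop over served_orders: ts/ds are the reversed stacks, popped from the
-- end ([-1] access = getLast?, pop = dropLast; the getD 0 default is never used on
-- the reached branches, which all guard non-emptiness as Source B does).
def fcfsAltLoop : List Int → List Int → List Int → Bool
  | ts, ds, order :: rest =>
      if !ts.isEmpty && !ds.isEmpty then
        if ts.getLast?.getD 0 < ds.getLast?.getD 0 then
          if ts.getLast?.getD 0 == order then fcfsAltLoop ts.dropLast ds rest else false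
        else
          if ds.getLast?.getD 0 == order then fcfsAltLoop ts ds.dropLast rest else false
      else if !ts.isEmpty then
        if ts.getLast?.getD 0 == order then fcfsAltLoop ts.dropLast ds rest else false
      else if !ds.isEmpty then
        if ds.getLast?.getD 0 == order then fcfsAltLoop ts ds.dropLast rest else false
      else false
  | ts, ds, [] => ts.isEmpty && ds.isEmpty

def is_first_come_first_served_alt (take_out_orders : List Int) (dine_in_orders : List Int) (served_orders : List Int) : Bool :=
  fcfsAltLoop take_out_orders.reverse dine_in_orders.reverse served_orders

-- ===== PRECONDITION & SPEC =====
def Spec_is_first_come_first_served (take_out_orders : List Int) (dine_in_orders : List Int) (served_orders : List Int) (out : Bool) : Prop := out = is_first_come_first_served_alt take_out_orders dine_in_orders served_orders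
instance (take_out_orders : List Int) (dine_in_orders : List Int) (served_orders : List Int) (out : Bool) : Decidable (Spec_is_first_come_first_served take_out_orders dine_in_orders served_orders out) := by unfold Spec_is_first_come_first_served; infer_instance

-- ===== CLAIM (what is proved, stated in full; the proofs are below) =====
def Claim_equal_is_first_come_first_served : Prop := ∀ (take_out_orders : List Int) (dine_in_orders : List Int) (served_orders : List Int), Dom_is_first_come_first_served take_out_orders dine_in_orders served_orders → Spec_is_first_come_first_served take_out_orders dine_in_orders served_orders (is_first_come_first_served take_out_orders dine_in_orders served_orders)

-- ===== LEMMAS AND PROOFS =====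

-- Proof-only reference merge: the unique first-come-first-served sequence
def fcfsMerge : List Int → List Int → List Int
  | x :: xs, y :: ys =>
      if x < y then x :: fcfsMerge xs (y :: ys) else y :: fcfsMerge (x :: xs) ys
  | xs, [] => xs
  | [], ys => ys

theorem fcfsMerge_nil_left (ys : List Int) : fcfsMerge [] ys = ys := by
  cases ys <;> simp [fcfsMerge]

theorem fcfsMerge_nil_right (xs : List Int) : fcfsMerge xs [] = xs := by
  cases xs <;> simp [fcfsMerge]

theorem fcfsMerge_length (xs ys : List Int) :
    (fcfsMerge xs ys).length = xs.length + ys.length := by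
  fun_induction fcfsMerge xs ys <;> simp_all <;> omega

-- A's third loop decides equality of equal-length lists
theorem fcfsLoop3_eq (ys zs : List Int) (h : ys.length = zs.length) :
    fcfsLoop3 ys zs = decide (ys = zs) := by
  induction ys generalizing zs with
  | nil => cases zs with
    | nil => simp [fcfsLoop3]
    | cons z zs => simp at h
  | cons y ys ih =>
    cases zs with
    | nil => simp at h
    | cons z zs =>
      simp only [fcfsLoop3]
      by_cases hy : y = z <;> simp [hy, ih zs (by simpa using h)]

-- A's second loop with an empty dine_in tail decides equality of equal-length lists
theorem fcfsLoop2_nil (xs zs : List Int) (h : xs.length = zs.length) :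
    fcfsLoop2 xs [] zs = decide (xs = zs) := by
  induction xs generalizing zs with
  | nil => cases zs with
    | nil => simp [fcfsLoop2, fcfsLoop3]
    | cons z zs => simp at h
  | cons x xs ih =>
    cases zs with
    | nil => simp at h
    | cons z zs =>
      simp only [fcfsLoop2]
      by_cases hx : x = z <;> simp [hx, ih zs (by simpa using h)]

-- A's loop chain decides whether served equals the reference merged sequence
theorem fcfsLoop1_eq (xs ys zs : List Int) :
    xs.length + ys.length = zs.length → fcfsLoop1 xs ys zs = decide (fcfsMerge xs ys = zs) := by
  fun_induction fcfsLoop1 xs ys zs with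
  | case1 xs y ys z zs hlt ih =>
    intro h
    simp only [fcfsMerge, if_pos hlt, List.length_cons] at h ⊢
    simp [ih (by simp only [List.length_cons]; omega)]
  | case2 x xs y ys z zs hlt hne =>
    intro _
    simp [fcfsMerge, hlt, hne]
  | case3 x xs ys z zs hge ih =>
    intro h
    simp only [fcfsMerge, if_neg hge, List.length_cons] at h ⊢
    simp [ih (by simp only [List.length_cons]; omega)]
  | case4 x xs y ys z zs hge hne =>
    intro _
    simp [fcfsMerge, hge, hne]
  | case5 xs ys zs hne =>
    intro h
    match xs, ys, zs with
    | [], ys, zs =>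
      simp only [fcfsLoop2, fcfsMerge_nil_left]
      cases ys with
      | nil => cases zs with
        | nil => simp [fcfsLoop3]
        | cons z zs => simp at h
      | cons y ys => exact fcfsLoop3_eq _ _ (by simpa using h)
    | x :: xs, [], zs =>
      rw [fcfsMerge_nil_right]
      cases zs with
      | nil => simp at h
      | cons z zs =>
        simp only [fcfsLoop2]
        by_cases hx : x = z
        · simp [hx, fcfsLoop2_nil xs zs (by simpa using h)]
        · simp [hx]
    | x :: xs, y :: ys, [] => simp at h
    | x :: xs, y :: ys, z :: zs => exact (hne x xs y ys z zs rfl rfl rfl).elim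

-- B's stack loop, run on the reversed queues, decides whether served equals the reference merge
theorem fcfsAltLoop_eq (s : List Int) : ∀ (t d : List Int),
    fcfsAltLoop t.reverse d.reverse s = decide (fcfsMerge t d = s) := by
  induction s with
  | nil =>
    intro t d
    have hm : (fcfsMerge t d = []) ↔ (t = [] ∧ d = []) := by
      constructor
      · intro he
        have hl := fcfsMerge_length t d
        rw [he] at hl
        simp only [List.length_nil] at hl
        have ht : t.length = 0 := by omega
        have hd : d.length = 0 := by omega
        exact ⟨List.eq_nil_of_length_eq_zero ht, List.eq_nil_of_length_eq_zero hd⟩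
      · rintro ⟨rfl, rfl⟩; exact fcfsMerge_nil_left []
    rw [show (decide (fcfsMerge t d = []) = (decide (t = []) && decide (d = []))) by
      simp [hm]]
    cases t <;> cases d <;> simp [fcfsAltLoop]
  | cons o rest ih =>
    intro t d
    rcases t with _ | ⟨x, xs⟩ <;> rcases d with _ | ⟨y, ys⟩
    · simp [fcfsAltLoop, fcfsMerge]
    · have hrec := ih [] ys
      simp only [List.reverse_nil, fcfsMerge_nil_left] at hrec
      simp only [fcfsAltLoop, List.reverse_nil, List.reverse_cons, fcfsMerge_nil_left]
      by_cases hy : y = o <;>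
        simp [hy, ← List.reverse_cons, hrec]
    · have hrec := ih xs []
      simp only [List.reverse_nil, fcfsMerge_nil_right] at hrec
      simp only [fcfsAltLoop, List.reverse_nil, List.reverse_cons, fcfsMerge_nil_right]
      by_cases hx : x = o <;>
        simp [hx, ← List.reverse_cons, hrec]
    · simp only [fcfsAltLoop, List.reverse_cons, fcfsMerge]
      by_cases hlt : x < y
      · have hrec := ih xs (y :: ys)
        by_cases hx : x = o
        · subst hx; simp [hlt, ← List.reverse_cons, hrec]
        · simp [hlt, hx]
      · have hrec := ih (x :: xs) ys
        by_cases hy : y = o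
        · subst hy; simp [hlt, ← List.reverse_cons, hrec]
        · simp [hlt, hy]

-- ===== VERDICT (by name: the statement is the Claim_ definition above) =====
theorem is_first_come_first_served_spec : Claim_equal_is_first_come_first_served := by
  intro t d s _
  unfold Spec_is_first_come_first_served
  simp only [is_first_come_first_served, is_first_come_first_served_alt, fcfsAltLoop_eq]
  by_cases h : t.length + d.length = s.length
  · simp [h, fcfsLoop1_eq t d s h]
  · have : fcfsMerge t d ≠ s := by
      intro he; exact h (by rw [← fcfsMerge_length t d, he])
    simp [h, this]
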